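-- pv_equiv track=rewrite | github.com/yhilpisch/llmcode | code/ch12_metrics_text.py | _matching_chunks
-- ===== SOURCE A (Python) =====
-- from typing import Iterable, List, Sequence, Tuple
--
-- def _matching_chunks(h: Sequence, r: Sequence) -> Tuple[int, int]:
--     """Return (matches, chunks) for contiguous exact matches between h and r.
--
--     Used for a simplified METEOR chunk penalty.
--     """
--     # Build index of tokens in r
--     from collections import defaultdict
--
--     pos = defaultdict(list)
--     for j, tok in enumerate(r):
--         pos[tok].append(j)
--
--     matches = 0
--     chunks = 0
--     prev_j = None
--     for tok in h:
--         if not pos[tok]: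
--             continue
--         j = pos[tok].pop(0)  # greedy match leftmost
--         matches += 1
--         if prev_j is None or j != prev_j + 1:
--             chunks += 1
--         prev_j = j
--     return matches, chunks
-- ===== SOURCE B (Python) =====
-- def _matching_chunks(h, r):
--     """Return (matches, chunks) for contiguous exact matches between h and r.
--
--     Occurrence-zipping re-implementation: for each token, the k-th occurrence
--     in h matches the k-th occurrence in r (that is exactly greedy leftmost
--     matching), so group positions by token, zip the two occurrence lists per
--     token to obtain all matched (i, j) pairs at once, sort the pairs by
--     h-position, and count chunks in one scan over adjacent pairs.
--     """
--     from collections import defaultdict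
--
--     occ_h = defaultdict(list)
--     occ_r = defaultdict(list)
--     for i, x in enumerate(h):
--         occ_h[x].append(i)
--     for j, x in enumerate(r):
--         occ_r[x].append(j)
--     pairs = []
--     for t, hi in occ_h.items():
--         pairs.extend(zip(hi, occ_r[t]))
--     pairs.sort()
--     if not pairs:
--         return 0, 0
--     chunks = 1
--     for (_, a), (_, b) in zip(pairs, pairs[1:]):
--         if b != a + 1:
--             chunks += 1
--     return len(pairs), chunks
-- ===== Notes on version B (the rewrite author's own statement) =====
-- stated objective: alternative
-- what changed: Replaces A's stateful left-to-right greedy pass (consumable token->positions dict, pop(0), prev_j state machine) by a batch algorithm: group positions by token for both sequences, zip the per-token occurrence lists to get all matched (i,j) pairs at once, sort the pairs by h-position, and count chunks in one adjacent-pair scan with no mutable matching state.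
import Mathlib
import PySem

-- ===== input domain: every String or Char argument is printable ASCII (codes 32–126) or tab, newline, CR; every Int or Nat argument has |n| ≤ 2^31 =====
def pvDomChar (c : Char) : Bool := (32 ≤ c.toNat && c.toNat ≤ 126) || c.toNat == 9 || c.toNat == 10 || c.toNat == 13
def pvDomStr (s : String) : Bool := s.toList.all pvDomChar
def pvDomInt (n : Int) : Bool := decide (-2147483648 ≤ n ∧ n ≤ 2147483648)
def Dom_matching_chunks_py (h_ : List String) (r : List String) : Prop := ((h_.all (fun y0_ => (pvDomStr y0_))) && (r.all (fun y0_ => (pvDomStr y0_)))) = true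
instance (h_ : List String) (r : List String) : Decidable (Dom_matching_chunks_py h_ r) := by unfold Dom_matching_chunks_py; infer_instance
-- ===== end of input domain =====

-- B replaces A's stateful greedy pass over h (consumable token->positions dict, pop(0))
-- by a batch algorithm: per distinct token zip the occurrence lists of h and r,
-- sort all matched (i, j) pairs by h-position, count chunks in one adjacent scan (alternative).

-- ===== PORT A =====
-- pos = defaultdict(list); for j, tok in enumerate(r): pos[tok].append(j)
def pvBuildPos (r : List String) : PySem.Dict String (List Int) :=
  (PySem.List.enumerate r).foldl
    (fun d p => d.insert p.2 ((d.getD p.2 []) ++ [p.1])) PySem.Dict.empty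

-- loop body of A: state (pos, matches, chunks, prev_j)
def pvStepA (s : PySem.Dict String (List Int) × Int × Int × Option Int) (tok : String) :
    PySem.Dict String (List Int) × Int × Int × Option Int :=
  match s with
  | (d, m, c, prev) =>
    match d.getD tok [] with
    | [] => (d, m, c, prev)
    | j :: rest =>
        (d.insert tok rest, m + 1,
         (match prev with
          | none => c + 1
          | some p => if j ≠ p + 1 then c + 1 else c),
         some j)

def matching_chunks_py (h_ : List String) (r : List String) : Int × Int :=
  let st := h_.foldl pvStepA (pvBuildPos r, 0, 0, none)
  (st.2.1, st.2.2.1)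

-- ===== PORT B =====
-- occ = defaultdict(list); for i, x in enumerate(xs): occ[x].append(i)
def pvGroup (xs : List String) : PySem.Dict String (List Int) :=
  (PySem.List.enumerate xs).foldl
    (fun d p => d.modify p.2 [] (· ++ [p.1])) PySem.Dict.empty

-- for t, hi in occ_h.items(): pairs.extend(zip(hi, occ_r[t]));  pairs.sort();  adjacent scan
def matching_chunks_py_alt (h_ : List String) (r : List String) : Int × Int :=
  let occR := pvGroup r
  let pairs := (pvGroup h_).items.foldl
    (fun (acc : List (Int × Int)) q => acc ++ q.2.zip (occR.getD q.1 [])) []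
  match PySem.List.sorted2 pairs (fun p => p.1) (fun p => p.2) false with
  | [] => (0, 0)
  | p0 :: rest =>
      (((p0 :: rest).length : Int),
       ((p0 :: rest).zip rest).foldl
         (fun c q => if q.2.2 ≠ q.1.2 + 1 then c + 1 else c) 1)

-- ===== PRECONDITION & SPEC =====
def Spec_matching_chunks_py (h_ : List String) (r : List String) (out : Int × Int) : Prop := out = matching_chunks_py_alt h_ r
instance (h_ : List String) (r : List String) (out : Int × Int) : Decidable (Spec_matching_chunks_py h_ r out) := by unfold Spec_matching_chunks_py; infer_instance

-- ===== CLAIM (what is proved, stated in full; the proofs are below) =====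
def Claim_equal_matching_chunks_py : Prop := ∀ (h_ : List String) (r : List String), Dom_matching_chunks_py h_ r → Spec_matching_chunks_py h_ r (matching_chunks_py h_ r)

-- ===== LEMMAS AND PROOFS =====

-- positions (from offset i) of occurrences of tok in xs
def pvPos (xs : List String) (tok : String) (i : Int) : List Int :=
  match xs with
  | [] => []
  | t :: rest => (if t == tok then [i] else []) ++ pvPos rest tok (i + 1)

-- the greedy matched triples (token, i, j) in h order, rank state s
def pvTrip (r : List String) : List String → Int → (String → Nat) → List (String × Int × Int)
  | [], _, _ => []
  | tok :: hs, i, s =>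
      (match (pvPos r tok 0)[s tok]? with
       | some j => [(tok, i, j)]
       | none => []) ++ pvTrip r hs (i + 1) (fun t => if t = tok then s t + 1 else s t)

-- the (matches, chunks, prev) step, driven by the matched js alone
def pvStepJ (st : Int × Int × Option Int) (j : Int) : Int × Int × Option Int :=
  (st.1 + 1,
   (match st.2.2 with
    | none => st.2.1 + 1
    | some p => if j ≠ p + 1 then st.2.1 + 1 else st.2.1),
   some j)

def pvChunkFrom (p : Int) : List Int → Int
  | [] => 0
  | j :: js => (if j ≠ p + 1 then 1 else 0) + pvChunkFrom j js

-- A's dict maps each token to its full (ascending) position list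
theorem pvBuildPos_getD (r : List String) (i : Int)
    (d : PySem.Dict String (List Int)) (t : String) :
    (((PySem.List.enumerate r i).foldl
        (fun d p => d.insert p.2 ((d.getD p.2 []) ++ [p.1])) d).getD t []) =
      d.getD t [] ++ pvPos r t i := by
  induction r generalizing i d with
  | nil => simp [PySem.List.enumerate_nil, pvPos]
  | cons t0 rs ih =>
    rw [PySem.List.enumerate_cons]
    simp only [List.foldl_cons]
    rw [ih (i + 1) (d.insert t0 ((d.getD t0 []) ++ [i]))]
    rw [PySem.Dict.getD_insert]
    by_cases ht : t = t0
    · subst ht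
      simp [pvPos]
    · have ht0 : (t0 == t) = false := by
        simp only [beq_eq_false_iff_ne, ne_eq]
        intro hc; exact ht hc.symm
      simp [pvPos, ht, ht0]

-- A's h loop equals the pvStepJ fold over the matched js
theorem pvLoopA (r : List String) (h : List String) :
    ∀ (i : Int) (d : PySem.Dict String (List Int)) (s : String → Nat)
      (m c : Int) (prev : Option Int),
    (∀ t, d.getD t [] = (pvPos r t 0).drop (s t)) →
    (h.foldl pvStepA (d, m, c, prev)).2 =
      ((pvTrip r h i s).map (·.2.2)).foldl pvStepJ (m, c, prev) := by
  induction h with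
  | nil => intro i d s m c prev _; rfl
  | cons tok hs ih =>
    intro i d s m c prev hinv
    simp only [List.foldl_cons, pvTrip]
    have hd : d.getD tok [] = (pvPos r tok 0).drop (s tok) := hinv tok
    have hhead : ((pvPos r tok 0).drop (s tok)).head? = (pvPos r tok 0)[s tok]? :=
      List.head?_drop ..
    cases hm : (pvPos r tok 0)[s tok]? with
    | none =>
      have hdnil : d.getD tok [] = [] := by
        rw [hd]
        cases hdr : (pvPos r tok 0).drop (s tok) with
        | nil => rfl
        | cons a as => rw [hdr, hm] at hhead; simp at hhead
      have hA : pvStepA (d, m, c, prev) tok = (d, m, c, prev) := by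
        simp [pvStepA, hdnil]
      rw [hA]
      simp only [List.nil_append]
      apply ih (i + 1) d _ m c prev
      intro t
      by_cases ht : t = tok
      · subst ht
        have hnil : (pvPos r t 0).drop (s t) = [] := by rw [← hd]; exact hdnil
        have hnil1 : (pvPos r t 0).drop (s t + 1) = [] := by
          have h2 : (pvPos r t 0).drop (s t + 1) = ((pvPos r t 0).drop (s t)).tail := by
            rw [← List.drop_drop, List.drop_one]
          rw [h2, hnil]
          rfl
        simp [hdnil, hnil1]
      · simp only [if_neg ht]
        exact hinv t
    | some j =>
      have hcons : d.getD tok [] = j :: (pvPos r tok 0).drop (s tok + 1) := by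
        rw [hd]
        have h2 : (pvPos r tok 0).drop (s tok + 1) =
            ((pvPos r tok 0).drop (s tok)).tail := by
          rw [← List.drop_drop, List.drop_one]
        rw [h2]
        cases hdr : (pvPos r tok 0).drop (s tok) with
        | nil => rw [hdr, hm] at hhead; simp at hhead
        | cons a as =>
          rw [hdr, hm] at hhead
          simp only [List.head?_cons, Option.some.injEq] at hhead
          rw [hhead]
          rfl
      have hA : pvStepA (d, m, c, prev) tok =
          (d.insert tok ((pvPos r tok 0).drop (s tok + 1)), m + 1,
           (match prev with
            | none => c + 1
            | some p => if j ≠ p + 1 then c + 1 else c),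
           some j) := by
        simp [pvStepA, hcons]
      rw [hA]
      simp only [List.singleton_append, List.map_cons, List.foldl_cons]
      exact ih (i + 1) _ _ _ _ _ (by
        intro t
        rw [PySem.Dict.getD_insert]
        by_cases ht : t = tok
        · rw [if_pos ht, ht]
          simp
        · rw [if_neg ht]
          simp only [if_neg ht]
          exact hinv t)

-- closed form of the pvStepJ fold, from a previous match p
theorem pvFoldJ_some (js : List Int) : ∀ (m c p : Int), ∃ pr,
    js.foldl pvStepJ (m, c, some p) =
      (m + (js.length : Int), c + pvChunkFrom p js, pr) := by
  induction js with
  | nil => intro m c p; exact ⟨some p, by simp [pvChunkFrom]⟩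
  | cons j js ih =>
    intro m c p
    simp only [List.foldl_cons]
    have hstep : pvStepJ (m, c, some p) j =
        (m + 1, if j ≠ p + 1 then c + 1 else c, some j) := rfl
    rw [hstep]
    obtain ⟨pr, hpr⟩ := ih (m + 1) (if j ≠ p + 1 then c + 1 else c) j
    refine ⟨pr, ?_⟩
    rw [hpr]
    simp only [pvChunkFrom, List.length_cons, Prod.mk.injEq]
    refine ⟨by push_cast; ring, by split_ifs <;> ring, trivial⟩

-- positions grouped from enumerate equal pvPos
theorem pvEnumFilter (xs : List String) (t : String) : ∀ (i : Int),
    ((PySem.List.enumerate xs i).filter (fun p => p.2 == t)).map (·.1) = pvPos xs t i := by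
  induction xs with
  | nil => intro i; simp [PySem.List.enumerate_nil, pvPos]
  | cons x xs ih =>
    intro i
    rw [PySem.List.enumerate_cons]
    by_cases hx : x == t
    · simp [pvPos, hx, ih]
    · simp only [List.filter_cons]
      simp only [hx]
      simp [pvPos, hx, ih]

theorem pvGroup_getD (xs : List String) (t : String) :
    (pvGroup xs).getD t [] = pvPos xs t 0 := by
  unfold pvGroup
  rw [show (PySem.List.enumerate xs).foldl
      (fun d p => d.modify p.2 [] (· ++ [p.1])) PySem.Dict.empty =
      ((PySem.List.enumerate xs).map Prod.swap).foldl
        (fun d p => d.modify p.1 [] (· ++ [p.2])) PySem.Dict.empty from by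
    rw [List.foldl_map]
    rfl]
  rw [PySem.Dict.getD_foldl_modify_append]
  rw [List.filter_map, List.map_map]
  have h0 : (PySem.Dict.empty : PySem.Dict String (List Int)).getD t [] = [] := rfl
  rw [h0, List.nil_append]
  exact pvEnumFilter xs t 0

theorem pvGroup_keys (xs : List String) : (pvGroup xs).keys = PySem.Set.ofList xs := by
  have h := PySem.Dict.keys_foldl_modify_key (PySem.List.enumerate xs)
    (fun p : Int × String => p.2) ([] : List Int) (fun _ p => (· ++ [p.1])) PySem.Dict.empty
  rw [PySem.List.map_snd_enumerate] at h
  rw [show (PySem.Dict.empty : PySem.Dict String (List Int)).keys = ([] : List String) from rfl,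
    PySem.Set.update_nil_left] at h
  exact h

theorem pvGroup_keys_nodup (xs : List String) : (pvGroup xs).keys.Nodup := by
  unfold pvGroup
  exact PySem.Dict.nodup_keys_foldl_modify_key (PySem.List.enumerate xs)
    (fun p : Int × String => p.2) ([] : List Int) (fun _ p => (· ++ [p.1]))
    PySem.Dict.empty List.nodup_nil

theorem pvGroup_items (xs : List String) :
    (pvGroup xs).items = (PySem.Set.ofList xs).map (fun t => (t, pvPos xs t 0)) := by
  rw [PySem.Dict.items_eq_map_keys (pvGroup xs) (pvGroup_keys_nodup xs) []]
  rw [pvGroup_keys]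
  apply List.map_congr_left
  intro t _
  rw [pvGroup_getD]

-- per-token restriction of the greedy triples is the zip of the occurrence lists
theorem pvTrip_filter (r : List String) (t : String) : ∀ (h : List String) (i : Int) (s : String → Nat),
    ((pvTrip r h i s).filter (fun p => p.1 == t)).map (·.2) =
      (pvPos h t i).zip ((pvPos r t 0).drop (s t)) := by
  intro h
  induction h with
  | nil => intro i s; simp [pvTrip, pvPos]
  | cons tok hs ih =>
    intro i s
    by_cases ht : tok = t
    · subst ht
      have hhead : ((pvPos r tok 0).drop (s tok)).head? = (pvPos r tok 0)[s tok]? :=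
        List.head?_drop ..
      cases hm : (pvPos r tok 0)[s tok]? with
      | none =>
        have hnil : (pvPos r tok 0).drop (s tok) = [] := by
          cases hdr : (pvPos r tok 0).drop (s tok) with
          | nil => rfl
          | cons a as => rw [hdr, hm] at hhead; simp at hhead
        have hnil1 : (pvPos r tok 0).drop (s tok + 1) = [] := by
          have h2 : (pvPos r tok 0).drop (s tok + 1) =
              ((pvPos r tok 0).drop (s tok)).tail := by
            rw [← List.drop_drop, List.drop_one]
          rw [h2, hnil]; rfl
        simp only [pvTrip, hm, List.nil_append]
        rw [ih]
        simp only [pvPos]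
        simp [hnil, hnil1]
      | some j =>
        have hcons : (pvPos r tok 0).drop (s tok) =
            j :: (pvPos r tok 0).drop (s tok + 1) := by
          have h2 : (pvPos r tok 0).drop (s tok + 1) =
              ((pvPos r tok 0).drop (s tok)).tail := by
            rw [← List.drop_drop, List.drop_one]
          rw [h2]
          cases hdr : (pvPos r tok 0).drop (s tok) with
          | nil => rw [hdr, hm] at hhead; simp at hhead
          | cons a as =>
            rw [hdr, hm] at hhead
            simp only [List.head?_cons, Option.some.injEq] at hhead
            rw [hhead]; rfl
        simp only [pvTrip, hm, List.singleton_append, List.filter_cons,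
          beq_self_eq_true, if_true, List.map_cons]
        rw [ih]
        simp only [pvPos]
        simp [hcons]
    · have hb : (tok == t) = false := by simp [ht]
      have hss : (if t = tok then s t + 1 else s t) = s t := by
        rw [if_neg (fun hc => ht hc.symm)]
      cases hm : (pvPos r tok 0)[s tok]? with
      | none =>
        simp only [pvTrip, hm, List.nil_append]
        rw [ih]
        simp only [pvPos, hss, hb]
        simp
      | some j =>
        simp only [pvTrip, hm, List.singleton_append, List.filter_cons, hb,
          Bool.false_eq_true, if_false]
        rw [ih]
        simp only [pvPos, hss, hb]
        simp

-- disjoint-test filter splits as a permutation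
theorem pvFilterOrPerm {α : Type} (p q : α → Bool) (l : List α)
    (hx : ∀ x ∈ l, ¬(p x = true ∧ q x = true)) :
    (l.filter (fun x => p x || q x)).Perm (l.filter p ++ l.filter q) := by
  induction l with
  | nil => simp
  | cons a l ih =>
    have hx' : ∀ x ∈ l, ¬(p x = true ∧ q x = true) := fun x hm => hx x (by simp [hm])
    simp only [List.filter_cons]
    cases hp : p a with
    | true =>
      have hq : q a = false := by
        cases hq : q a with
        | false => rfl
        | true => exact absurd ⟨hp, hq⟩ (hx a (by simp))
      simp only [hq, Bool.true_or, if_pos]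
      simpa using (ih hx').cons a
    | false =>
      cases hq : q a with
      | true =>
        simp only [Bool.false_or]
        refine ((ih hx').cons a).trans ?_
        simpa using (List.perm_middle (a := a) (l₁ := l.filter p) (l₂ := l.filter q)).symm
      | false =>
        simp only [Bool.false_or]
        exact ih hx'

-- every matched triple's token occurs in h
theorem pvTrip_token_mem (r : List String) : ∀ (h : List String) (i : Int) (s : String → Nat)
    (p : String × Int × Int), p ∈ pvTrip r h i s → p.1 ∈ h := by
  intro h
  induction h with
  | nil => intro i s p hp; simp [pvTrip] at hp
  | cons tok hs ih =>
    intro i s p hp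
    simp only [pvTrip, List.mem_append] at hp
    rcases hp with hp | hp
    · cases hm : (pvPos r tok 0)[s tok]? with
      | none => rw [hm] at hp; simp at hp
      | some j =>
        rw [hm] at hp
        simp only [List.mem_singleton] at hp
        subst hp
        simp
    · exact List.mem_cons_of_mem _ (ih (i + 1) _ p hp)

-- the triples restricted to a nodup token list are a permutation of the per-token zips
theorem pvTrip_perm (r : List String) (h : List String) (i : Int) (s : String → Nat) :
    ∀ (K : List String), K.Nodup →
    (((pvTrip r h i s).filter (fun p => decide (p.1 ∈ K))).map (·.2)).Perm
      (K.flatMap (fun t => (pvPos h t i).zip ((pvPos r t 0).drop (s t)))) := by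
  intro K
  induction K with
  | nil => intro _; simp
  | cons t K' ih =>
    intro hnd
    have htK : t ∉ K' := (List.nodup_cons.mp hnd).1
    have hnd' : K'.Nodup := (List.nodup_cons.mp hnd).2
    have hpred : (fun (p : String × Int × Int) => decide (p.1 ∈ t :: K')) =
        (fun p => (p.1 == t) || decide (p.1 ∈ K')) := by
      funext p
      simp only [List.mem_cons]
      rw [Bool.decide_or, Bool.beq_eq_decide_eq]
    rw [hpred]
    have hdisj : ∀ p ∈ pvTrip r h i s,
        ¬((p.1 == t) = true ∧ decide (p.1 ∈ K') = true) := by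
      intro p _ ⟨h1, h2⟩
      rw [beq_iff_eq] at h1
      rw [decide_eq_true_iff] at h2
      exact htK (h1 ▸ h2)
    have hperm := pvFilterOrPerm (fun p => p.1 == t) (fun p => decide (p.1 ∈ K'))
      (pvTrip r h i s) hdisj
    refine ((hperm.map (·.2)).trans ?_)
    rw [List.map_append]
    rw [pvTrip_filter r t h i s]
    simp only [List.flatMap_cons]
    exact ((ih hnd').append_left _)

-- the matched triples have strictly increasing h-positions
theorem pvTrip_fst_lt (r : List String) : ∀ (h : List String) (i : Int) (s : String → Nat),
    (∀ p ∈ pvTrip r h i s, i ≤ p.2.1) ∧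
      (pvTrip r h i s).Pairwise (fun a b => a.2.1 < b.2.1) := by
  intro h
  induction h with
  | nil => intro i s; simp [pvTrip]
  | cons tok hs ih =>
    intro i s
    obtain ⟨ihle, ihpw⟩ := ih (i + 1) (fun t => if t = tok then s t + 1 else s t)
    constructor
    · intro p hp
      simp only [pvTrip, List.mem_append] at hp
      rcases hp with hp | hp
      · cases hm : (pvPos r tok 0)[s tok]? with
        | none => rw [hm] at hp; simp at hp
        | some j =>
          rw [hm] at hp
          simp only [List.mem_singleton] at hp
          subst hp
          simp
      · have := ihle p hp
        omega
    · simp only [pvTrip]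
      cases hm : (pvPos r tok 0)[s tok]? with
      | none => simpa using ihpw
      | some j =>
        simp only [List.singleton_append, List.pairwise_cons]
        refine ⟨?_, ihpw⟩
        intro p hp
        have := ihle p hp
        show i < p.2.1
        omega

-- insertBy only compares against list members
theorem pvInsertBy_congr {α : Type} (f g : α → α → Bool) (x : α) :
    ∀ (acc : List α), (∀ y ∈ acc, f x y = g x y) →
    PySem.List.insertBy f x acc = PySem.List.insertBy g x acc := by
  intro acc
  induction acc with
  | nil => intro _; rfl
  | cons y ys ih =>
    intro hy
    simp only [PySem.List.insertBy]
    rw [hy y (by simp)]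
    cases g x y with
    | true => rfl
    | false =>
      rw [if_neg (by simp), if_neg (by simp)]
      have := ih (fun z hz => hy z (by simp [hz]))
      rw [this]

-- on pairwise-distinct first components, Python's tuple sort is the sort by fst
theorem pvSorted2_eq_sorted (xs : List (Int × Int)) :
    ∀ (acc : List (Int × Int)),
    (∀ x ∈ xs, ∀ y ∈ acc, x.1 ≠ y.1) →
    xs.Pairwise (fun a b => a.1 ≠ b.1) →
    xs.foldl (fun acc x => PySem.List.insertBy
        (fun a b => decide (a.1 < b.1) || (!decide (b.1 < a.1) && decide (a.2 < b.2))) x acc) acc =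
      xs.foldl (fun acc x => PySem.List.insertBy (fun a b => decide (a.1 < b.1)) x acc) acc := by
  induction xs with
  | nil => intro acc _ _; rfl
  | cons x xs ih =>
    intro acc hacc hpw
    simp only [List.foldl_cons]
    have hstep : PySem.List.insertBy
        (fun a b => decide (a.1 < b.1) || (!decide (b.1 < a.1) && decide (a.2 < b.2))) x acc =
        PySem.List.insertBy (fun a b => decide (a.1 < b.1)) x acc := by
      apply pvInsertBy_congr
      intro y hy
      have hne : x.1 ≠ y.1 := hacc x (by simp) y hy
      rcases lt_trichotomy x.1 y.1 with hlt | heq | hgt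
      · simp [hlt, not_lt_of_gt hlt]
      · exact absurd heq hne
      · simp [hgt, not_lt_of_gt hgt]
    rw [hstep]
    apply ih
    · intro x' hx' y hy
      rw [PySem.List.mem_insertBy] at hy
      rcases hy with hy | hy
      · subst hy
        exact ((List.pairwise_cons.mp hpw).1 x' hx').symm
      · exact hacc x' (by simp [hx']) y hy
    · exact (List.pairwise_cons.mp hpw).2

-- B's adjacent-pair scan computes pvChunkFrom
theorem pvChunkFold (rest : List (Int × Int)) : ∀ (p0 : Int × Int) (c : Int),
    ((p0 :: rest).zip rest).foldl
        (fun c q => if q.2.2 ≠ q.1.2 + 1 then c + 1 else c) c =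
      c + pvChunkFrom p0.2 (rest.map (·.2)) := by
  induction rest with
  | nil => intro p0 c; simp [pvChunkFrom]
  | cons q rs ih =>
    intro p0 c
    simp only [List.zip_cons_cons, List.foldl_cons, List.map_cons, pvChunkFrom]
    rw [ih q _]
    split_ifs <;> ring

-- ===== VERDICT (by name: the statement is the Claim_ definition above) =====
theorem matching_chunks_py_spec : Claim_equal_matching_chunks_py := by
  intro h_ r _
  unfold Spec_matching_chunks_py matching_chunks_py matching_chunks_py_alt
  have hinv : ∀ t, (pvBuildPos r).getD t [] =
      (pvPos r t 0).drop ((fun _ => 0 : String → Nat) t) := by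
    intro t
    unfold pvBuildPos
    rw [pvBuildPos_getD r 0 PySem.Dict.empty t]
    simp [PySem.Dict.getD]
  have hA := pvLoopA r h_ 0 (pvBuildPos r) (fun _ => 0) 0 0 none hinv
  have hpairsB : (pvGroup h_).items.foldl
      (fun (acc : List (Int × Int)) q => acc ++ q.2.zip ((pvGroup r).getD q.1 [])) [] =
      (PySem.Set.ofList h_).flatMap (fun t => (pvPos h_ t 0).zip (pvPos r t 0)) := by
    rw [PySem.List.foldl_append_eq_flatMap
      (fun q : String × List Int => q.2.zip ((pvGroup r).getD q.1 [])) (pvGroup h_).items []]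
    rw [pvGroup_items, List.flatMap_map, List.nil_append]
    have hfun : (fun a : String => (pvPos h_ a 0).zip ((pvGroup r).getD a [])) =
        (fun a => (pvPos h_ a 0).zip (pvPos r a 0)) := by
      funext a; rw [pvGroup_getD]
    exact congrArg (fun f => List.flatMap f (PySem.Set.ofList h_)) hfun
  have hfull : (pvTrip r h_ 0 (fun _ => 0)).filter
      (fun p => decide (p.1 ∈ PySem.List.dedup h_)) = pvTrip r h_ 0 (fun _ => 0) := by
    apply List.filter_eq_self.mpr
    intro p hp
    rw [decide_eq_true_iff, PySem.List.mem_dedup]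
    exact pvTrip_token_mem r h_ 0 _ p hp
  have hperm : ((pvTrip r h_ 0 (fun _ => 0)).map (·.2)).Perm
      ((PySem.Set.ofList h_).flatMap (fun t => (pvPos h_ t 0).zip (pvPos r t 0))) := by
    have hp := pvTrip_perm r h_ 0 (fun _ => 0) (PySem.List.dedup h_) (PySem.List.nodup_dedup h_)
    rw [hfull, PySem.List.dedup_eq_ofList] at hp
    have hfun : (fun t => (pvPos h_ t 0).zip
        ((pvPos r t 0).drop ((fun _ => 0 : String → Nat) t))) =
        (fun t => (pvPos h_ t 0).zip (pvPos r t 0)) := by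
      funext t; rw [List.drop_zero]
    rw [hfun] at hp
    exact hp
  have hpwtrip := (pvTrip_fst_lt r h_ 0 (fun _ => 0)).2
  have hpwlt : ((pvTrip r h_ 0 (fun _ => 0)).map (·.2)).Pairwise (fun a b => a.1 < b.1) := by
    rw [List.pairwise_map]
    exact hpwtrip
  have hnd : ((PySem.Set.ofList h_).flatMap
      (fun t => (pvPos h_ t 0).zip (pvPos r t 0))).Pairwise (fun a b => a.1 ≠ b.1) := by
    have hsym : Symmetric (fun a b : Int × Int => a.1 ≠ b.1) := fun a b hab => hab.symm
    exact (hperm.pairwise_iff (fun {a b} hab => hsym hab)).mp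
      (hpwlt.imp (fun hab => ne_of_lt hab))
  have hsort : PySem.List.sorted2
      ((PySem.Set.ofList h_).flatMap (fun t => (pvPos h_ t 0).zip (pvPos r t 0)))
      (fun p => p.1) (fun p => p.2) false = (pvTrip r h_ 0 (fun _ => 0)).map (·.2) := by
    have h1 : PySem.List.sorted2
        ((PySem.Set.ofList h_).flatMap (fun t => (pvPos h_ t 0).zip (pvPos r t 0)))
        (fun p => p.1) (fun p => p.2) false =
        PySem.List.sorted
          ((PySem.Set.ofList h_).flatMap (fun t => (pvPos h_ t 0).zip (pvPos r t 0)))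
          (fun p => p.1) false := by
      have h0 : PySem.List.sorted2
          ((PySem.Set.ofList h_).flatMap (fun t => (pvPos h_ t 0).zip (pvPos r t 0)))
          (fun p => p.1) (fun p => p.2) false =
          ((PySem.Set.ofList h_).flatMap (fun t => (pvPos h_ t 0).zip (pvPos r t 0))).foldl
            (fun acc x => PySem.List.insertBy
              (fun a b => decide (a.1 < b.1) || (!decide (b.1 < a.1) && decide (a.2 < b.2))) x acc)
            [] := rfl
      rw [h0, pvSorted2_eq_sorted _ [] (by simp) hnd]
      exact (PySem.List.sorted_eq_foldl_insertBy
        ((PySem.Set.ofList h_).flatMap (fun t => (pvPos h_ t 0).zip (pvPos r t 0)))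
        (fun p : Int × Int => p.1)).symm
    rw [h1]
    exact PySem.List.sorted_eq_of_perm_of_pairwise_lt
      ((PySem.Set.ofList h_).flatMap (fun t => (pvPos h_ t 0).zip (pvPos r t 0)))
      ((pvTrip r h_ 0 (fun _ => 0)).map (·.2)) (fun p => p.1) hperm hpwlt
  have hjs : (pvTrip r h_ 0 (fun _ => 0)).map (·.2.2) =
      ((pvTrip r h_ 0 (fun _ => 0)).map (·.2)).map (·.2) := by
    rw [List.map_map]
    rfl
  simp only [hpairsB, hsort, hA, hjs]
  cases hT : (pvTrip r h_ 0 (fun _ => 0)).map (·.2) with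
  | nil => rfl
  | cons p0 rest =>
    simp only [List.map_cons, List.foldl_cons]
    have hstep : pvStepJ (0, 0, none) p0.2 = (1, 1, some p0.2) := rfl
    rw [hstep]
    obtain ⟨pr, hpr⟩ := pvFoldJ_some (rest.map (·.2)) 1 1 p0.2
    rw [hpr, pvChunkFold rest p0 1]
    simp only [List.length_cons, List.length_map, Prod.mk.injEq]
    refine ⟨by push_cast; ring, trivial⟩
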